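-- pv_equiv track=rewrite | github.com/lilymaryam/UC_Davis_iGEM | findss.py | create_histograms
-- ===== SOURCE A (Python) =====
-- def create_histograms(p5,p3,n5,n3):
-- 	p5.sort()
-- 	p3.sort()
-- 	n5.sort()
-- 	n3.sort()
-- 	hists = []
-- 	distances = [p5,p3,n5,n3]
-- 	for d in distances:
-- 		hist = {}
-- 		for i in d:
-- 			if i not in hist:
-- 				hist[i] = 1
-- 			else:
-- 				hist[i] += 1
-- 		hists.append(hist)
-- 	return hists
-- ===== SOURCE B (Python) =====
-- def _run_length_hist(d):
--     # d is sorted, so equal values are contiguous: count run lengths in one pass.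
--     hist = {}
--     if not d:
--         return hist
--     key = d[0]
--     cnt = 1
--     for x in d[1:]:
--         if x == key:
--             cnt += 1
--         else:
--             hist[key] = cnt
--             key = x
--             cnt = 1
--     hist[key] = cnt
--     return hist
--
-- def create_histograms(p5, p3, n5, n3):
--     p5.sort()
--     p3.sort()
--     n5.sort()
--     n3.sort()
--     return [_run_length_hist(d) for d in (p5, p3, n5, n3)]
-- ===== Notes on version B (the rewrite author's own statement) =====
-- stated objective: alternative
-- what changed: Replaces the per-element dict-membership counting loop by a single run-length scan of each already-sorted list (track current key and run count, emit (key, count) when the run ends), exploiting that equal values are contiguous after sorting; the four in-place sorts are kept.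
import Mathlib
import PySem

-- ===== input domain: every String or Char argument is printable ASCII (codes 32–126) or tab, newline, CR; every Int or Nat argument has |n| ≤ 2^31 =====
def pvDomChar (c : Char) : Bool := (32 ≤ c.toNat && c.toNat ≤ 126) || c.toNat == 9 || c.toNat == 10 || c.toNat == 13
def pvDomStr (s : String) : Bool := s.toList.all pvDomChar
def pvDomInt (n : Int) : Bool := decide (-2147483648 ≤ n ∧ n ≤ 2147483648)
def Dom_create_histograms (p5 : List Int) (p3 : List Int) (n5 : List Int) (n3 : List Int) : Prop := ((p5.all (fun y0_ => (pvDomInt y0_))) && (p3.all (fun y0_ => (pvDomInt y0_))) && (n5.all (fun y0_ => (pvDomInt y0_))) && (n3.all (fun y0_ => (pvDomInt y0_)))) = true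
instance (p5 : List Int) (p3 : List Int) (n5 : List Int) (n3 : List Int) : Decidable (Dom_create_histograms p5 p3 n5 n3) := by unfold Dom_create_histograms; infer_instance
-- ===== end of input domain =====

-- B replaces the dict-membership counting loop by a run-length scan of each sorted list
-- (alternative algorithm, same cost).  NOTE: the Python A sorts its four arguments IN PLACE
-- (B performs the same mutation); the equivalence proved here is about the RETURN value.

-- ===== PORT A =====
-- hist = {}; for i in d: if i not in hist: hist[i] = 1 else: hist[i] += 1
def pyCountHist (d : List Int) : PySem.Dict Int Int :=
  d.foldl (fun hist i =>
    if hist.contains i = false then hist.insert i 1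
    else hist.insert i (hist.getD i 0 + 1)) PySem.Dict.empty

def create_histograms (p5 : List Int) (p3 : List Int) (n5 : List Int) (n3 : List Int) : List (List (Int × Int)) :=
  let p5s := PySem.List.sorted p5 (fun x => x) false
  let p3s := PySem.List.sorted p3 (fun x => x) false
  let n5s := PySem.List.sorted n5 (fun x => x) false
  let n3s := PySem.List.sorted n3 (fun x => x) false
  let distances := [p5s, p3s, n5s, n3s]
  distances.foldl (fun hists d => hists ++ [(pyCountHist d).items]) []

-- ===== PORT B =====
-- the loop of _run_length_hist: key/cnt accumulator, emit (key, cnt) when the run ends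
def runsAux : Int → Int → List Int → List (Int × Int)
  | key, cnt, [] => [(key, cnt)]
  | key, cnt, x :: xs => if x = key then runsAux key (cnt + 1) xs else (key, cnt) :: runsAux x 1 xs

def runLengthHist : List Int → List (Int × Int)
  | [] => []
  | x :: xs => runsAux x 1 xs

def create_histograms_alt (p5 : List Int) (p3 : List Int) (n5 : List Int) (n3 : List Int) : List (List (Int × Int)) :=
  let p5s := PySem.List.sorted p5 (fun x => x) false
  let p3s := PySem.List.sorted p3 (fun x => x) false
  let n5s := PySem.List.sorted n5 (fun x => x) false
  let n3s := PySem.List.sorted n3 (fun x => x) false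
  [runLengthHist p5s, runLengthHist p3s, runLengthHist n5s, runLengthHist n3s]

-- ===== PRECONDITION & SPEC =====
def Spec_create_histograms (p5 : List Int) (p3 : List Int) (n5 : List Int) (n3 : List Int) (out : List (List (Int × Int))) : Prop := out = create_histograms_alt p5 p3 n5 n3
instance (p5 : List Int) (p3 : List Int) (n5 : List Int) (n3 : List Int) (out : List (List (Int × Int))) : Decidable (Spec_create_histograms p5 p3 n5 n3 out) := by unfold Spec_create_histograms; infer_instance

-- ===== CLAIM (what is proved, stated in full; the proofs are below) =====
def Claim_equal_create_histograms : Prop := ∀ (p5 : List Int) (p3 : List Int) (n5 : List Int) (n3 : List Int), Dom_create_histograms p5 p3 n5 n3 → Spec_create_histograms p5 p3 n5 n3 (create_histograms p5 p3 n5 n3)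

-- ===== LEMMAS AND PROOFS =====

-- A's counting loop is collections.Counter (the if-branch inserts 1 = getD + 1 on a missing key)
lemma pyCountHist_eq_counter (d : List Int) : pyCountHist d = PySem.Dict.counter d := by
  unfold pyCountHist
  have hstep : (fun (hist : PySem.Dict Int Int) (i : Int) =>
      if hist.contains i = false then hist.insert i 1
      else hist.insert i (hist.getD i 0 + 1)) =
      fun hist i => hist.insert i (hist.getD i 0 + 1) := by
    funext hist i
    by_cases hc : hist.contains i = true
    · simp [hc]
    · have h0 : hist.getD i 0 = 0 :=
        PySem.Dict.getD_of_not_contains hist 0 (by simpa using hc)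
      simp [hc, h0]
  rw [hstep, PySem.Dict.foldl_insert_getD_add_one_eq_counter]

-- invariant of the run-length loop on a sorted tail t lying at or above the current key
lemma runsAux_spec (t : List Int) (k c : Int)
    (hs : t.Pairwise (· ≤ ·)) (hb : ∀ x ∈ t, k ≤ x) :
    runsAux k c t = (k, c + (t.count k : Int)) ::
      ((PySem.Set.ofList t).filter (fun y => !(y == k))).map
        (fun j => (j, (t.count j : Int))) := by
  induction t generalizing k c with
  | nil => simp [runsAux, PySem.Set.ofList]
  | cons x xs ih =>
    have hxs : xs.Pairwise (· ≤ ·) := hs.tail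
    have hxb : ∀ y ∈ xs, x ≤ y := fun y hy => List.rel_of_pairwise_cons hs hy
    simp only [runsAux]
    have hdis : PySem.Set.discard (PySem.Set.ofList xs) x =
        (PySem.Set.ofList xs).filter (fun y => !(y == x)) := by
      simp [PySem.Set.discard]
    by_cases hx : x = k
    · subst hx
      rw [if_pos rfl, ih x (c + 1) hxs hxb, PySem.Set.ofList_cons, hdis]
      simp only [List.filter_cons, beq_self_eq_true, Bool.not_true, List.filter_filter,
        Bool.and_self]
      congr 1
      · have : (x :: xs).count x = xs.count x + 1 := by simp
        rw [this]; push_cast; ring_nf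
      · apply List.map_congr_left
        intro j hj
        have hjne : j ≠ x := by
          have := (List.mem_filter.mp hj).2; simpa using this
        simp [Ne.symm hjne]
    · have hkx : k < x := lt_of_le_of_ne (hb x (List.mem_cons_self ..)) (Ne.symm hx)
      rw [if_neg hx, ih x 1 hxs hxb]
      have hgt : ∀ y ∈ xs, k < y := fun y hy => lt_of_lt_of_le hkx (hxb y hy)
      have hcountk : xs.count k = 0 := by
        rw [List.count_eq_zero]
        intro hmem; exact absurd rfl (ne_of_gt (hgt k hmem))
      rw [PySem.Set.ofList_cons, hdis]
      have hxk : (x == k) = false := by simpa using hx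
      simp only [List.filter_cons, hxk, Bool.not_false, List.filter_filter]
      have hfid : ((PySem.Set.ofList xs).filter fun y => !(y == k) && !(y == x)) =
          (PySem.Set.ofList xs).filter (fun y => !(y == x)) := by
        apply List.filter_congr
        intro j hj
        have hjxs : j ∈ xs := (PySem.List.mem_dedup xs j).mp hj
        have : j ≠ k := ne_of_gt (hgt j hjxs)
        simp [this]
      rw [hfid]
      congr 1
      · have : (x :: xs).count k = 0 := by simp [hcountk, hx]
        rw [this]; norm_num
      · congr 1
        · show (x, 1 + (xs.count x : Int)) = (x, ((x :: xs).count x : Int))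
          have : (x :: xs).count x = xs.count x + 1 := by simp
          rw [this]; push_cast; ring_nf
        · apply List.map_congr_left
          intro j hj
          have hjne : j ≠ x := by
            have := (List.mem_filter.mp hj).2; simpa using this
          simp [Ne.symm hjne]

-- per-list: A's dict items on a sorted list are exactly B's run-length pairs
lemma hist_eq (s : List Int) (hs : s.Pairwise (· ≤ ·)) :
    (pyCountHist s).items = runLengthHist s := by
  rw [pyCountHist_eq_counter, PySem.Dict.items_counter]
  cases s with
  | nil => simp [runLengthHist, PySem.Set.ofList]
  | cons x xs =>
    have hxs : xs.Pairwise (· ≤ ·) := hs.tail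
    have hxb : ∀ y ∈ xs, x ≤ y := fun y hy => List.rel_of_pairwise_cons hs hy
    rw [runLengthHist, runsAux_spec xs x 1 hxs hxb]
    rw [PySem.Set.ofList_cons]
    have hdis : PySem.Set.discard (PySem.Set.ofList xs) x =
        (PySem.Set.ofList xs).filter (fun y => !(y == x)) := by
      simp [PySem.Set.discard]
    rw [hdis]
    simp only [List.map_cons]
    congr 1
    · have : (x :: xs).count x = xs.count x + 1 := by simp
      rw [this]; push_cast; ring_nf
    · apply List.map_congr_left
      intro j hj
      have hjne : j ≠ x := by
        have := (List.mem_filter.mp hj).2; simpa using this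
      simp [Ne.symm hjne]

lemma hist_eq_sorted (l : List Int) :
    (pyCountHist (PySem.List.sorted l (fun x => x) false)).items =
      runLengthHist (PySem.List.sorted l (fun x => x) false) := by
  apply hist_eq
  simpa using PySem.List.sorted_pairwise (xs := l) (key := fun x => x)

-- ===== VERDICT (by name: the statement is the Claim_ definition above) =====
theorem create_histograms_spec : Claim_equal_create_histograms := by
  intro p5 p3 n5 n3 _
  unfold Spec_create_histograms create_histograms create_histograms_alt
  simp [List.foldl, hist_eq_sorted]
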